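-- pv_equiv track=rewrite | github.com/dislovelhl/acgs2 | acgs2-core/services/core/constraint_generation_system/dynamic_updater.py | _find_common_violations
-- ===== SOURCE A (Python) =====
-- from typing import Dict, Any, List, Optional, TYPE_CHECKING
--
-- def _find_common_violations(violations: List[str]) -> List[str]:
--     """
--     找出常见约束违反
--
--     Args:
--         violations: 违反列表
--
--     Returns:
--         常见违反模式
--     """
--     from collections import Counter
--
--     # 统计违反频率
--     violation_counts = Counter(violations)
--
--     # 返回最常见的违反（出现率>20%）
--     total_violations = len(violations)
--     common_violations = [
--         violation for violation, count in violation_counts.items()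
--         if count / total_violations > 0.2
--     ]
--
--     return common_violations[:5]  # 最多5个
-- ===== SOURCE B (Python) =====
-- def _find_common_violations(violations):
--     """Sort-then-scan: sort a copy so equal values are adjacent, read each
--     value's total count off its run length in one scan, then restore
--     first-appearance order with a single pass over the original list."""
--     n = len(violations)
--     qualifying = set()
--     run_val, run_len = None, 0
--     for v in sorted(violations):
--         if v == run_val:
--             run_len += 1
--         else:
--             if run_val is not None and run_len * 5 > n:
--                 qualifying.add(run_val)
--             run_val, run_len = v, 1
--     if run_val is not None and run_len * 5 > n:
--         qualifying.add(run_val)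
--     result = []
--     for v in violations:
--         if v in qualifying and v not in result:
--             result.append(v)
--     return result[:5]
-- ===== Notes on version B (the rewrite author's own statement) =====
-- stated objective: alternative
-- what changed: Counts by sorting a copy and reading each value's frequency off adjacent run lengths (sort-then-scan) instead of building a Counter hash table, then restores first-appearance order with one pass over the original list.
import Mathlib
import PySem

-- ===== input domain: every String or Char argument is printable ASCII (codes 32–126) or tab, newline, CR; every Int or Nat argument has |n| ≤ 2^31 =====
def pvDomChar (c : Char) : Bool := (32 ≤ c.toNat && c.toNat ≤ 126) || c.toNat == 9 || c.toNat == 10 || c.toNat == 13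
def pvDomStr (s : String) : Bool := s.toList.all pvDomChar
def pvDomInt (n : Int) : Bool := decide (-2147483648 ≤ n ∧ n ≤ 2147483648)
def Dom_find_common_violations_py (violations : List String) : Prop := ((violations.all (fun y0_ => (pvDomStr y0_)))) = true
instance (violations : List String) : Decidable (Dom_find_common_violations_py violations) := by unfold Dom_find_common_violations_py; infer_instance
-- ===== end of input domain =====

-- B counts by sorting a copy and reading run lengths (sort-then-scan) instead of A's Counter table, then restores first-appearance order in one pass (alternative algorithm, same results).


-- ===== PORT A =====
-- Counter(violations); keep items whose count/total > 0.2; first 5.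
-- 'count / total > 0.2' is ported as the exact integer test '5 * count > total': for counts
-- and totals bounded by 2^31 the float comparison and the rational one agree (the quotient is
-- more than 1/(5*2^31) away from 0.2 whenever they could disagree, far beyond double rounding);
-- 'total' is only ever used when items is nonempty, so no division by zero arises.
def find_common_violations_py (violations : List String) : List String :=
  let violation_counts : PySem.Dict String Int := PySem.Dict.counter violations
  let total_violations : Int := (violations.length : Int)
  let common_violations : List String :=
    ((violation_counts.items.filter (fun p => decide (5 * p.2 > total_violations))).map (·.1))
  common_violations.take 5  -- xs[:5] with a nonnegative literal bound = take 5

-- ===== PORT B =====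
-- one iteration of B's run-length scan over the sorted copy; state = (qualifying, run_val, run_len);
-- 'run_len * 5 > n' is B's own integer test, ported as written
def pvRunStep (n : Int) (st : PySem.Set String × Option String × Int) (v : String) :
    PySem.Set String × Option String × Int :=
  if st.2.1 = some v then (st.1, st.2.1, st.2.2 + 1)
  else
    match st.2.1 with
    | some rv => if st.2.2 * 5 > n then (PySem.Set.add st.1 rv, some v, 1) else (st.1, some v, 1)
    | none => (st.1, some v, 1)

-- the trailing 'if run_val is not None and run_len * 5 > n: qualifying.add(run_val)'
def pvRunFlush (n : Int) (st : PySem.Set String × Option String × Int) : PySem.Set String :=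
  match st.2.1 with
  | some rv => if st.2.2 * 5 > n then PySem.Set.add st.1 rv else st.1
  | none => st.1

def find_common_violations_py_alt (violations : List String) : List String :=
  let n : Int := (violations.length : Int)
  let qualifying : PySem.Set String :=
    pvRunFlush n
      ((PySem.List.sorted violations (fun x => x) false).foldl (pvRunStep n)
        (PySem.Set.empty, none, 0))
  let result : List String :=
    violations.foldl
      (fun r v => if PySem.Set.contains qualifying v ∧ v ∉ r then r ++ [v] else r) []
  result.take 5  -- result[:5]

-- ===== PRECONDITION & SPEC =====
def Spec_find_common_violations_py (violations : List String) (out : List String) : Prop := out = find_common_violations_py_alt violations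
instance (violations : List String) (out : List String) : Decidable (Spec_find_common_violations_py violations out) := by unfold Spec_find_common_violations_py; infer_instance

-- ===== CLAIM (what is proved, stated in full; the proofs are below) =====
def Claim_equal_find_common_violations_py : Prop := ∀ (violations : List String), Dom_find_common_violations_py violations → Spec_find_common_violations_py violations (find_common_violations_py violations)

-- ===== LEMMAS AND PROOFS =====

-- membership in the qualifying set built by B's run-length scan over a Pairwise-(≤) list,
-- from a running state (q, some rv, k) where rv is ≤ every element of the remainder
lemma pvRun_mem (n : Int) (x : String) : ∀ (s : List String) (q : PySem.Set String)
    (rv : String) (k : Int), s.Pairwise (· ≤ ·) → (∀ y ∈ s, rv ≤ y) →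
    (x ∈ pvRunFlush n (s.foldl (pvRunStep n) (q, some rv, k)) ↔
      x ∈ q ∨ (x = rv ∧ (k + (s.count rv : Int)) * 5 > n) ∨
        (x ∈ s ∧ x ≠ rv ∧ ((s.count x : Int)) * 5 > n)) := by
  intro s
  induction s with
  | nil =>
    intro q rv k _ _
    by_cases hk : k * 5 > n <;>
      simp [pvRunFlush, PySem.Set.mem_add, hk]
  | cons v t ih =>
    intro q rv k hp hle
    have hpt : t.Pairwise (· ≤ ·) := hp.tail
    have hvt : ∀ y ∈ t, v ≤ y := fun y hy => (List.pairwise_cons.mp hp).1 y hy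
    by_cases hv : rv = v
    · subst hv
      rw [List.foldl_cons]
      simp only [pvRunStep, if_true]
      rw [ih q rv (k + 1) hpt (fun y hy => hle y (List.mem_cons_of_mem _ hy))]
      constructor
      · rintro (h | ⟨hx, hc⟩ | ⟨hm, hne, hc⟩)
        · exact Or.inl h
        · refine Or.inr (Or.inl ⟨hx, ?_⟩)
          rw [List.count_cons_self]; push_cast at hc ⊢; omega
        · exact Or.inr (Or.inr ⟨List.mem_cons_of_mem _ hm, hne, by
            rwa [List.count_cons_of_ne (Ne.symm hne)]⟩)
      · rintro (h | ⟨hx, hc⟩ | ⟨hm, hne, hc⟩)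
        · exact Or.inl h
        · refine Or.inr (Or.inl ⟨hx, ?_⟩)
          rw [List.count_cons_self] at hc; push_cast at hc ⊢; omega
        · rcases List.mem_cons.mp hm with h1 | h1
          · exact absurd h1 hne
          · exact Or.inr (Or.inr ⟨h1, hne, by
              rwa [List.count_cons_of_ne (Ne.symm hne)] at hc⟩)
    · -- rv ≠ v : the run ends; rv < v, so rv does not occur again
      have hrvlt : rv < v := lt_of_le_of_ne (hle v List.mem_cons_self) hv
      have hrvnot : rv ∉ t := fun h => absurd (hvt rv h) (not_le_of_gt hrvlt)
      have hcnt0 : (v :: t).count rv = 0 :=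
        List.count_eq_zero.mpr (by simp [List.mem_cons, hv, hrvnot])
      rw [List.foldl_cons]
      simp only [pvRunStep]
      rw [if_neg (by simp [hv])]
      by_cases hk : k * 5 > n
      · rw [if_pos hk]
        rw [ih (PySem.Set.add q rv) v 1 hpt hvt]
        rw [PySem.Set.mem_add]
        constructor
        · rintro ((h | h) | ⟨hx, hc⟩ | ⟨hm, hne, hc⟩)
          · exact Or.inl h
          · refine Or.inr (Or.inl ⟨h, ?_⟩)
            rw [hcnt0]; push_cast; omega
          · subst hx
            exact Or.inr (Or.inr ⟨List.mem_cons_self, fun hh => hv hh.symm, by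
              rw [List.count_cons_self]; push_cast at hc ⊢; omega⟩)
          · refine Or.inr (Or.inr ⟨List.mem_cons_of_mem _ hm, ?_, ?_⟩)
            · intro hx; subst hx; exact hrvnot hm
            · rwa [List.count_cons_of_ne (Ne.symm hne)]
        · rintro (h | ⟨hx, hc⟩ | ⟨hm, hne, hc⟩)
          · exact Or.inl (Or.inl h)
          · subst hx; exact Or.inl (Or.inr rfl)
          · by_cases hxv : x = v
            · subst hxv
              refine Or.inr (Or.inl ⟨rfl, ?_⟩)
              rw [List.count_cons_self] at hc; push_cast at hc ⊢; omega
            · rcases List.mem_cons.mp hm with h1 | h1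
              · exact absurd h1 hxv
              · exact Or.inr (Or.inr ⟨h1, hxv, by
                  rwa [List.count_cons_of_ne (Ne.symm hxv)] at hc⟩)
      · rw [if_neg hk]
        rw [ih q v 1 hpt hvt]
        constructor
        · rintro (h | ⟨hx, hc⟩ | ⟨hm, hne, hc⟩)
          · exact Or.inl h
          · subst hx
            exact Or.inr (Or.inr ⟨List.mem_cons_self, fun hh => hv hh.symm, by
              rw [List.count_cons_self]; push_cast at hc ⊢; omega⟩)
          · refine Or.inr (Or.inr ⟨List.mem_cons_of_mem _ hm, ?_, ?_⟩)
            · intro hx; subst hx; exact hrvnot hm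
            · rwa [List.count_cons_of_ne (Ne.symm hne)]
        · rintro (h | ⟨hx, hc⟩ | ⟨hm, hne, hc⟩)
          · exact Or.inl h
          · subst hx
            rw [hcnt0] at hc; push_cast at hc; omega
          · by_cases hxv : x = v
            · subst hxv
              refine Or.inr (Or.inl ⟨rfl, ?_⟩)
              rw [List.count_cons_self] at hc; push_cast at hc ⊢; omega
            · rcases List.mem_cons.mp hm with h1 | h1
              · exact absurd h1 hxv
              · exact Or.inr (Or.inr ⟨h1, hxv, by
                  rwa [List.count_cons_of_ne (Ne.symm hxv)] at hc⟩)

-- the full scan yields exactly the values occurring in more than a fifth of the list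
lemma pvQualify_mem (violations : List String) (x : String) :
    x ∈ pvRunFlush (violations.length : Int)
        ((PySem.List.sorted violations (fun x => x) false).foldl
          (pvRunStep (violations.length : Int)) (PySem.Set.empty, none, 0)) ↔
      x ∈ violations ∧ ((violations.count x : Int)) * 5 > (violations.length : Int) := by
  have hperm := PySem.List.sorted_perm violations (fun x => x) false
  have hpw : (PySem.List.sorted violations (fun x => x) false).Pairwise (· ≤ ·) := by
    simpa using PySem.List.sorted_pairwise violations (fun x => x)
  cases hs : PySem.List.sorted violations (fun x => x) false with
  | nil =>
    have : violations = [] := by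
      have := hperm; rw [hs] at this; exact this.symm.eq_nil
    simp [this, pvRunFlush]
  | cons v t =>
    rw [hs] at hperm hpw
    have hvt : ∀ y ∈ t, v ≤ y := fun y hy => (List.pairwise_cons.mp hpw).1 y hy
    rw [List.foldl_cons]
    have hstep : pvRunStep (violations.length : Int) (PySem.Set.empty, none, 0) v
        = (PySem.Set.empty, some v, 1) := by
      simp [pvRunStep, PySem.Set.empty]
    rw [hstep, pvRun_mem _ _ t _ v 1 hpw.tail hvt]
    have hcx : violations.count x = (v :: t).count x := hperm.symm.count_eq x
    have hmx : x ∈ violations ↔ x ∈ v :: t := ⟨fun h => hperm.symm.mem_iff.mp h,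
      fun h => hperm.mem_iff.mp h⟩
    rw [hcx, hmx]
    constructor
    · rintro (h | ⟨hx, hc⟩ | ⟨hm, hne, hc⟩)
      · simp [PySem.Set.empty] at h
      · subst hx
        refine ⟨List.mem_cons_self, ?_⟩
        rw [List.count_cons_self]; push_cast at hc ⊢; omega
      · exact ⟨List.mem_cons_of_mem _ hm, by rwa [List.count_cons_of_ne (Ne.symm hne)]⟩
    · rintro ⟨hm, hc⟩
      by_cases hxv : x = v
      · subst hxv
        refine Or.inr (Or.inl ⟨rfl, ?_⟩)
        rw [List.count_cons_self] at hc; push_cast at hc ⊢; omega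
      · rcases List.mem_cons.mp hm with h1 | h1
        · exact absurd h1 hxv
        · exact Or.inr (Or.inr ⟨h1, hxv, by
            rwa [List.count_cons_of_ne (Ne.symm hxv)] at hc⟩)

-- the fresh first occurrences of l relative to an already-seen list
def pvFresh (seen l : List String) : List String :=
  match l with
  | [] => []
  | x :: t => if PySem.Set.contains seen x then pvFresh seen t else x :: pvFresh (seen ++ [x]) t

lemma pvFresh_update (l : List String) : ∀ seen : List String,
    PySem.Set.update seen l = seen ++ pvFresh seen l := by
  induction l with
  | nil => intro seen; simp [pvFresh, PySem.Set.update]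
  | cons x t ih =>
    intro seen
    by_cases h : x ∈ seen
    · simpa [pvFresh, PySem.Set.update, PySem.Set.add, PySem.Set.contains, h] using ih seen
    · simpa [pvFresh, PySem.Set.update, PySem.Set.add, PySem.Set.contains, h] using ih (seen ++ [x])

-- B's ordering pass: the result list itself serves as the seen structure, which is sound
-- because only qualifying values are ever appended (hence the r ↔ seen link for members of q)
lemma pvPass2 (q : PySem.Set String) : ∀ (l r seen : List String),
    (∀ v, v ∈ q → (v ∈ r ↔ v ∈ seen)) →
    l.foldl (fun r v => if PySem.Set.contains q v ∧ v ∉ r then r ++ [v] else r) r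
      = r ++ (pvFresh seen l).filter (fun v => PySem.Set.contains q v) := by
  intro l
  induction l with
  | nil => intro r seen _; simp [pvFresh]
  | cons v t ih =>
    intro r seen hlink
    rw [List.foldl_cons]
    by_cases hq : v ∈ q
    · have hcq : PySem.Set.contains q v = true := by simpa [PySem.Set.contains_iff] using hq
      by_cases hr : v ∈ r
      · have hseen : v ∈ seen := (hlink v hq).mp hr
        rw [if_neg (by simp [hr])]
        rw [ih r seen hlink]
        simp [pvFresh, hseen]
      · have hseen : v ∉ seen := fun h => hr ((hlink v hq).mpr h)
        rw [if_pos ⟨by simpa using hcq, hr⟩]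
        rw [ih (r ++ [v]) (seen ++ [v]) (by
          intro w hw
          simp only [List.mem_append, List.mem_singleton]
          rw [hlink w hw])]
        simp [pvFresh, hseen, hq, List.append_assoc]
    · rw [if_neg (fun hh => hq (by simpa using hh.1))]
      by_cases hseen : v ∈ seen
      · rw [ih r seen hlink]
        simp [pvFresh, hseen]
      · rw [ih r (seen ++ [v]) (by
          intro w hw
          have hwv : w ≠ v := fun h => hq (h ▸ hw)
          simp only [List.mem_append, List.mem_singleton, hwv, or_false]
          exact hlink w hw)]
        simp [pvFresh, hseen, hq]

-- ===== VERDICT (by name: the statement is the Claim_ definition above) =====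
theorem find_common_violations_py_spec : Claim_equal_find_common_violations_py := by
  intro violations _
  unfold Spec_find_common_violations_py
  simp only [find_common_violations_py, find_common_violations_py_alt]
  rw [pvPass2 _ violations [] [] (fun v _ => Iff.rfl)]
  have hfresh : pvFresh [] violations = PySem.Set.ofList violations := by
    have h := pvFresh_update violations []
    simpa [PySem.Set.update_nil_left] using h.symm
  rw [hfresh]
  rw [PySem.Dict.items_counter]
  rw [List.filter_map, List.map_map]
  simp only [List.nil_append]
  congr 1
  have hid : ((fun p : String × Int => p.1) ∘ fun k => (k, (violations.count k : Int))) = id := by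
    funext k; rfl
  rw [hid, List.map_id]
  apply List.filter_congr
  intro v hv
  have hvmem : v ∈ violations := by
    simpa [PySem.Set.mem_ofList] using hv
  have hiff := pvQualify_mem violations v
  rw [Bool.eq_iff_iff]
  simp only [decide_eq_true_iff, Function.comp]
  constructor
  · intro h
    have : v ∈ violations ∧ ((violations.count v : Int)) * 5 > (violations.length : Int) :=
      ⟨hvmem, by omega⟩
    simpa [PySem.Set.contains_iff] using (hiff.mpr this)
  · intro h
    have := hiff.mp (by simpa [PySem.Set.contains_iff] using h)
    omega
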